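-- pv_equiv track=rewrite | github.com/JimZGChow/dragonradio | python/dragon/radio.py | defaultFDMASchedule
-- ===== SOURCE A (Python) =====
-- def defaultFDMASchedule(n, k, nodes):
--     """
--     Determine the default FDMA schedule.
--
--     Args:
--         n: The number of channels.
--         k: Desired channel separation.
--         nodes: The nodes to schedule.
--
--     Returns:
--         A channel assignment.
--     """
--     nodes = nodes[:n]
--
--     sched = [None] * n
--
--     i = 0
--     while len(nodes) != 0:
--         if sched[i] == None:
--             sched[i] = nodes[0]
--             nodes = nodes[1:]
--             i += k
--         else:
--             i += 1
--
--         if i >= len(sched):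
--             i = 0
--
--     return sched
-- ===== SOURCE B (Python) =====
-- def defaultFDMASchedule(n, k, nodes):
--     """
--     Determine the default FDMA schedule.
--
--     Keeps an explicit ascending list of the still-free channels and pops the
--     first free channel at or after the roving index (wrapping to the smallest
--     one), found by binary search, instead of re-slicing the node list and
--     re-scanning the schedule array.
--     """
--     if n <= 0:
--         return []
--
--     sched = [None] * n
--     free = list(range(n))   # ascending list of still-free channels
--     i = 0
--     for node in nodes[:n]:
--         # binary search: lo = first index with free[lo] >= i
--         lo, hi = 0, len(free)
--         while lo < hi:
--             mid = (lo + hi) // 2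
--             if free[mid] < i:
--                 lo = mid + 1
--             else:
--                 hi = mid
--         if lo == len(free):
--             lo = 0          # wrap around to the smallest free channel
--         pos = free.pop(lo)
--         sched[pos] = node
--         i = pos + k
--         if i >= n:
--             i = 0
--     return sched
-- ===== Notes on version B (the rewrite author's own statement) =====
-- stated objective: faster
-- what changed: B keeps an explicit ascending list of the still-free channels and binary-searches it for the first free channel at or after the roving index (wrapping to the smallest), instead of re-slicing the node list and linearly re-scanning the schedule array for every placement.
-- outside the precondition, e.g. on defaultFDMASchedule(3, -1, [1, 2]): A returns [1, None, 2], B returns [1, 2, None]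
import Mathlib
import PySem

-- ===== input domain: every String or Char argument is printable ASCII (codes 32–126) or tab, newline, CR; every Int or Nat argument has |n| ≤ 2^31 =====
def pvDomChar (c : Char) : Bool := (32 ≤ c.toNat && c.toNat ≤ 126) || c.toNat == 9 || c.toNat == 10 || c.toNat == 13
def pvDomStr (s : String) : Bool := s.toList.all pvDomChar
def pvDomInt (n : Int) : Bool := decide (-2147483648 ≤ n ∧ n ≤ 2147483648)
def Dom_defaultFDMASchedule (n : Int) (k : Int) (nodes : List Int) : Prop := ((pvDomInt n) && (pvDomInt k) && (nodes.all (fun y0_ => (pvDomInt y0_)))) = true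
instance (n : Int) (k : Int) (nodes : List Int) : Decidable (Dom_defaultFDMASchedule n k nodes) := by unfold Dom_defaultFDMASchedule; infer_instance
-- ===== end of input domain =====

-- B keeps an ascending free-channel list searched by binary search instead of re-slicing the
-- node list and re-scanning the schedule; a timing run measured it faster. Return value only.

-- ===== PORT A =====
-- the while loop, one fuel unit per Python iteration; on IndexError (outside Pre_) it returns sched
def pvALoop (k : Int) : Nat → List (Option Int) → Int → List Int → List (Option Int)
  | 0, sched, _, _ => sched
  | _ + 1, sched, _, [] => sched
  | fuel + 1, sched, i, x :: rest =>
    match PySem.List.pyGet? sched i with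
    | none => sched
    | some cell =>
      if cell = none then
        pvALoop k fuel (PySem.List.pySetD sched i (some x))
          (if ((PySem.List.pySetD sched i (some x)).length : Int) ≤ i + k then 0 else i + k) rest
      else
        pvALoop k fuel sched (if (sched.length : Int) ≤ i + 1 then 0 else i + 1) (x :: rest)

def defaultFDMASchedule (n : Int) (k : Int) (nodes : List Int) : List (Option Int) :=
  pvALoop k
    ((PySem.List.slice nodes none (some n)).length * ((List.replicate n.toNat (none : Option Int)).length + 1) + 1)
    (List.replicate n.toNat (none : Option Int)) 0 (PySem.List.slice nodes none (some n))

-- ===== PORT B =====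
-- Source B's hand-written binary search: first index lo in [lo,hi) with free[lo] >= i
def pvBisectGo : Nat → List Int → Int → Nat → Nat → Nat
  | 0, _, _, lo, _ => lo
  | d + 1, free, i, lo, hi =>
    if lo < hi then
      if free.getD ((lo + hi) / 2) 0 < i then pvBisectGo d free i ((lo + hi) / 2 + 1) hi
      else pvBisectGo d free i lo ((lo + hi) / 2)
    else lo

def pvBisect (free : List Int) (i : Int) (lo hi : Nat) : Nat :=
  pvBisectGo (hi - lo) free i lo hi

-- Source B's for loop over the nodes; pop from an empty free list (IndexError, outside Pre_) returns sched
def pvBLoop (n : Int) (k : Int) : List Int → List (Option Int) → List Int → Int → List (Option Int)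
  | [], sched, _, _ => sched
  | x :: rest, sched, free, i =>
    match PySem.List.pop? free
        (((if pvBisect free i 0 free.length = free.length then 0 else pvBisect free i 0 free.length) : Nat) : Int) with
    | none => sched
    | some (pos, free') =>
      pvBLoop n k rest (PySem.List.pySetD sched pos (some x)) free'
        (if n ≤ pos + k then 0 else pos + k)

def defaultFDMASchedule_alt (n : Int) (k : Int) (nodes : List Int) : List (Option Int) :=
  if n ≤ 0 then []
  else
    pvBLoop n k (PySem.List.slice nodes none (some n))
      (List.replicate n.toNat (none : Option Int)) (PySem.List.pyRange 0 n 1) 0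

-- ===== PRECONDITION & SPEC =====
-- Pre_ restricts to the natural domain: a nonnegative separation k when there is anything to place
-- (with k < 0 the roving index goes negative, where A either raises IndexError or assigns through
-- Python's negative-index wraparound), and for n < 0 only inputs whose truncation nodes[:n] is
-- empty (otherwise A raises IndexError on sched[0]).
def Pre_defaultFDMASchedule (n : Int) (k : Int) (nodes : List Int) : Prop :=
  (0 < n → (0 ≤ k ∨ nodes = [])) ∧ (n < 0 → (nodes.length : Int) ≤ -n)
instance (n : Int) (k : Int) (nodes : List Int) : Decidable (Pre_defaultFDMASchedule n k nodes) := by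
  unfold Pre_defaultFDMASchedule; infer_instance

def pvWitness_defaultFDMASchedule : Int × Int × List Int := (4, 2, [1, 2, 3])

def Spec_defaultFDMASchedule (n : Int) (k : Int) (nodes : List Int) (out : List (Option Int)) : Prop :=
  out = defaultFDMASchedule_alt n k nodes
instance (n : Int) (k : Int) (nodes : List Int) (out : List (Option Int)) : Decidable (Spec_defaultFDMASchedule n k nodes out) := by
  unfold Spec_defaultFDMASchedule; infer_instance

-- ===== CLAIM (what is proved, stated in full; the proofs are below) =====
def Claim_equal_defaultFDMASchedule : Prop := ∀ (n : Int) (k : Int) (nodes : List Int), Dom_defaultFDMASchedule n k nodes → Pre_defaultFDMASchedule n k nodes → Spec_defaultFDMASchedule n k nodes (defaultFDMASchedule n k nodes)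

-- ===== LEMMAS AND PROOFS =====

-- the ascending list of free (still-None) positions of sched
def pvFreeOf (sched : List (Option Int)) : List Int :=
  ((List.range sched.length).filter (fun t => decide (sched[t]? = some none))).map (fun (t : Nat) => (t : Int))

-- distance (in A's loop iterations) from index i to the slot A's scan will fill
def pvScanDist (n : Int) (F : List Int) (i : Int) : Nat :=
  match (F.filter (fun p => decide (i ≤ p))).head? with
  | some p => (p - i).toNat
  | none =>
    match F.head? with
    | some q => (n - i + q).toNat
    | none => 0

lemma pvMem_freeOf (sched : List (Option Int)) (t : Nat) :
    ((t : Int) ∈ pvFreeOf sched) ↔ sched[t]? = some none := by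
  simp only [pvFreeOf, List.mem_map, List.mem_filter, List.mem_range, decide_eq_true_eq]
  constructor
  · rintro ⟨s, ⟨_, hsome⟩, heq⟩
    have hst : s = t := by exact_mod_cast heq
    exact hst ▸ hsome
  · intro h
    have ht : t < sched.length := by
      rcases List.getElem?_eq_some_iff.mp h with ⟨h1, _⟩; exact h1
    exact ⟨t, ⟨ht, h⟩, rfl⟩

lemma pvFreeOf_bounds (sched : List (Option Int)) (p : Int) (hp : p ∈ pvFreeOf sched) :
    0 ≤ p ∧ p < (sched.length : Int) := by
  simp only [pvFreeOf, List.mem_map, List.mem_filter, List.mem_range] at hp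
  rcases hp with ⟨s, ⟨hs, _⟩, heq⟩
  omega

lemma pvFreeOf_sorted (sched : List (Option Int)) : (pvFreeOf sched).Pairwise (· < ·) := by
  have h1 : (List.range sched.length).Pairwise (· < ·) := List.pairwise_lt_range
  have h2 := h1.filter (fun t => decide (sched[t]? = some none))
  exact List.Pairwise.map _ (fun a b h => by exact_mod_cast h) h2

lemma pvFreeOf_nodup (sched : List (Option Int)) : (pvFreeOf sched).Nodup :=
  (pvFreeOf_sorted sched).imp (fun h => ne_of_lt h)

lemma pvFreeOf_set (sched : List (Option Int)) (t : Nat) (ht : t < sched.length) (x : Int) :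
    pvFreeOf (sched.set t (some x)) = (pvFreeOf sched).filter (fun p => decide (p ≠ (t : Int))) := by
  unfold pvFreeOf
  rw [List.length_set, List.filter_map, List.filter_filter]
  congr 1
  apply List.filter_congr
  intro s hs
  rw [List.mem_range] at hs
  by_cases hst : s = t
  · subst hst
    simp [ht]
  · have hts : ¬ t = s := fun h => hst h.symm
    simp [hts, hst, Function.comp]

lemma pvSorted_getD_lt (F : List Int) (hs : F.Pairwise (· < ·)) (s t : Nat)
    (hst : s < t) (ht : t < F.length) : F.getD s 0 < F.getD t 0 := by
  have hsl : s < F.length := lt_trans hst ht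
  rw [List.getD_eq_getElem _ _ hsl, List.getD_eq_getElem _ _ ht]
  exact List.pairwise_iff_getElem.mp hs s t hsl ht hst

lemma pvGetD_mem (F : List Int) (t : Nat) (ht : t < F.length) : F.getD t 0 ∈ F := by
  rw [List.getD_eq_getElem _ _ ht]
  exact List.getElem_mem _

-- the binary search meets its specification
lemma pvBisect_spec (F : List Int) (i : Int) (hs : F.Pairwise (· < ·)) :
    ∀ (d lo hi : Nat), hi - lo ≤ d → lo ≤ hi → hi ≤ F.length →
      (∀ t, t < lo → F.getD t 0 < i) → (∀ t, hi ≤ t → t < F.length → i ≤ F.getD t 0) →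
      pvBisectGo d F i lo hi ≤ F.length ∧
      (∀ t, t < pvBisectGo d F i lo hi → F.getD t 0 < i) ∧
      (∀ t, pvBisectGo d F i lo hi ≤ t → t < F.length → i ≤ F.getD t 0) := by
  intro d
  induction d with
  | zero =>
    intro lo hi hd hlh hhl hlow hhigh
    have heq : lo = hi := by omega
    subst heq
    rw [pvBisectGo]
    exact ⟨hhl, hlow, fun t ht1 ht2 => hhigh t ht1 ht2⟩
  | succ d ihd =>
    intro lo hi hd hlh hhl hlow hhigh
    by_cases hlt : lo < hi
    · rw [pvBisectGo, if_pos hlt]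
      have hm1 : lo ≤ (lo + hi) / 2 := by omega
      have hm2 : (lo + hi) / 2 < hi := by omega
      by_cases hc : F.getD ((lo + hi) / 2) 0 < i
      · rw [if_pos hc]
        apply ihd ((lo + hi) / 2 + 1) hi (by omega) (by omega) hhl
        · intro t ht
          rcases Nat.lt_or_ge t ((lo + hi) / 2) with h | h
          · exact lt_trans (pvSorted_getD_lt F hs t _ h (by omega)) hc
          · have : t = (lo + hi) / 2 := by omega
            exact this ▸ hc
        · exact hhigh
      · rw [if_neg hc]
        rw [not_lt] at hc
        apply ihd lo ((lo + hi) / 2) (by omega) (by omega) (by omega) hlow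
        intro t ht1 ht2
        rcases Nat.lt_or_ge ((lo + hi) / 2) t with h | h
        · exact le_of_lt (lt_of_le_of_lt hc (pvSorted_getD_lt F hs _ t h ht2))
        · have : t = (lo + hi) / 2 := by omega
          exact this ▸ hc
    · rw [pvBisectGo, if_neg hlt]
      exact ⟨by omega, hlow, fun t ht1 ht2 => hhigh t (by omega) ht2⟩

-- any index with the bisection property is THE bisection result
lemma pvJ_unique (F : List Int) (i : Int) (j1 j2 : Nat)
    (h1 : j1 ≤ F.length ∧ (∀ t, t < j1 → F.getD t 0 < i) ∧ (∀ t, j1 ≤ t → t < F.length → i ≤ F.getD t 0))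
    (h2 : j2 ≤ F.length ∧ (∀ t, t < j2 → F.getD t 0 < i) ∧ (∀ t, j2 ≤ t → t < F.length → i ≤ F.getD t 0)) :
    j1 = j2 := by
  rcases h1 with ⟨hl1, hlow1, hhigh1⟩
  rcases h2 with ⟨hl2, hlow2, hhigh2⟩
  by_contra hne
  rcases Nat.lt_or_ge j1 j2 with h | h
  · have hj1 : j1 < F.length := by omega
    have ha := hlow2 j1 h
    have hb := hhigh1 j1 (le_refl _) hj1
    omega
  · have h' : j2 < j1 := by omega
    have hj2 : j2 < F.length := by omega
    have ha := hlow1 j2 h'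
    have hb := hhigh2 j2 (le_refl _) hj2
    omega

lemma pvBisect_full (F : List Int) (i : Int) (hs : F.Pairwise (· < ·)) :
    pvBisect F i 0 F.length ≤ F.length ∧
    (∀ t, t < pvBisect F i 0 F.length → F.getD t 0 < i) ∧
    (∀ t, pvBisect F i 0 F.length ≤ t → t < F.length → i ≤ F.getD t 0) := by
  unfold pvBisect
  rw [Nat.sub_zero]
  exact pvBisect_spec F i hs F.length 0 F.length (by omega) (by omega) (le_refl _)
    (by intro t ht; omega) (by intro t ht hlt; omega)

-- when i itself is free, the search lands exactly on i
lemma pvBisect_of_mem (F : List Int) (i : Int) (hs : F.Pairwise (· < ·)) (hm : i ∈ F) :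
    pvBisect F i 0 F.length < F.length ∧ F.getD (pvBisect F i 0 F.length) 0 = i := by
  obtain ⟨hjle, hlow, hhigh⟩ := pvBisect_full F i hs
  obtain ⟨idx, hidx, hval⟩ := List.mem_iff_getElem.mp hm
  have hvalD : F.getD idx 0 = i := by rw [List.getD_eq_getElem _ _ hidx]; exact hval
  have hjlt : pvBisect F i 0 F.length < F.length := by
    by_contra h
    have h2 := hlow idx (by omega)
    rw [hvalD] at h2
    omega
  refine ⟨hjlt, ?_⟩
  have h1 := hhigh _ (le_refl _) hjlt
  rcases lt_trichotomy idx (pvBisect F i 0 F.length) with h | h | h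
  · have h2 := hlow idx h
    rw [hvalD] at h2
    omega
  · rw [← h]; exact hvalD
  · have h2 := pvSorted_getD_lt F hs _ idx h hidx
    rw [hvalD] at h2
    omega

-- when i is not free, stepping i to i+1 does not change the search result
lemma pvBisect_succ (F : List Int) (i : Int) (hs : F.Pairwise (· < ·)) (hm : i ∉ F) :
    pvBisect F i 0 F.length = pvBisect F (i + 1) 0 F.length := by
  have s1 := pvBisect_full F i hs
  have s2 := pvBisect_full F (i + 1) hs
  apply pvJ_unique F (i + 1) _ _ ?_ s2
  refine ⟨s1.1, ?_, ?_⟩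
  · intro t ht
    have := s1.2.1 t ht
    omega
  · intro t ht1 ht2
    have h1 := s1.2.2 t ht1 ht2
    have h2 : F.getD t 0 ≠ i := by
      intro he
      exact hm (he ▸ pvGetD_mem F t ht2)
    omega

-- when everything free is below i, the search falls off the end (wrap case) …
lemma pvBisect_top (F : List Int) (i : Int) (hs : F.Pairwise (· < ·))
    (hub : ∀ p ∈ F, p < i) : pvBisect F i 0 F.length = F.length := by
  apply pvJ_unique F i _ _ (pvBisect_full F i hs) ⟨le_refl _, ?_, ?_⟩
  · intro t ht
    exact hub _ (pvGetD_mem F t (by omega))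
  · intro t ht1 ht2
    omega

-- … and from 0 it lands on the head
lemma pvBisect_zero (F : List Int) (hs : F.Pairwise (· < ·)) (h0 : ∀ p ∈ F, 0 ≤ p) :
    pvBisect F 0 0 F.length = 0 := by
  apply pvJ_unique F 0 _ _ (pvBisect_full F 0 hs) ⟨Nat.zero_le _, ?_, ?_⟩
  · intro t ht
    omega
  · intro t _ ht2
    exact h0 _ (pvGetD_mem F t ht2)

lemma pvEraseIdx_eq_filter (F : List Int) (j : Nat) (hj : j < F.length) (hn : F.Nodup) :
    F.eraseIdx j = F.filter (fun p => decide (p ≠ F.getD j 0)) := by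
  induction F generalizing j with
  | nil => simp at hj
  | cons a tl ih =>
    have ha : a ∉ tl := (List.nodup_cons.mp hn).1
    have hn' : tl.Nodup := (List.nodup_cons.mp hn).2
    cases j with
    | zero =>
      rw [List.getD_cons_zero, List.eraseIdx_cons_zero, List.filter_cons]
      simp only [ne_eq, not_true_eq_false, decide_false, Bool.false_eq_true,
        if_false]
      symm
      rw [List.filter_eq_self]
      intro b hb
      simp only [decide_eq_true_eq]
      intro h
      exact ha (h ▸ hb)
    | succ j' =>
      have hj' : j' < tl.length := by simpa using hj
      rw [List.getD_cons_succ, List.eraseIdx_cons_succ, List.filter_cons]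
      have hne : a ≠ tl.getD j' 0 := by
        intro he
        exact ha (he ▸ pvGetD_mem tl j' hj')
      rw [if_pos (by simp only [decide_eq_true_eq]; exact hne)]
      exact congrArg (a :: ·) (ih j' hj' hn')

lemma pvScanDist_succ (n : Int) (F : List Int) (i : Int) (hne : F ≠ []) (hni : i ∉ F)
    (h0 : ∀ p ∈ F, 0 ≤ p) (hlt : i + 1 < n) :
    pvScanDist n F (i + 1) + 1 = pvScanDist n F i := by
  have hfilter : F.filter (fun p => decide (i + 1 ≤ p)) = F.filter (fun p => decide (i ≤ p)) := by
    apply List.filter_congr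
    intro p hp
    have hpi : p ≠ i := fun h => hni (h ▸ hp)
    rw [decide_eq_decide]
    omega
  unfold pvScanDist
  rw [hfilter]
  cases hh : (F.filter (fun p => decide (i ≤ p))).head? with
  | some p =>
    have hpm : p ∈ F.filter (fun p => decide (i ≤ p)) := List.mem_of_mem_head? (by rw [hh]; rfl)
    rw [List.mem_filter, decide_eq_true_eq] at hpm
    have hpi : p ≠ i := fun h => hni (h ▸ hpm.1)
    simp only []
    omega
  | none =>
    cases F with
    | nil => exact absurd rfl hne
    | cons q tl =>
      have hq : (0:Int) ≤ q := h0 q List.mem_cons_self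
      simp only [List.head?_cons]
      omega

lemma pvScanDist_wrap (n : Int) (F : List Int) (i : Int) (hne : F ≠ []) (hni : i ∉ F)
    (h0 : ∀ p ∈ F, 0 ≤ p) (hub : ∀ p ∈ F, p < n) (hge : n ≤ i + 1) (hin : i < n) :
    pvScanDist n F 0 + 1 = pvScanDist n F i := by
  have hfi : F.filter (fun p => decide (i ≤ p)) = [] := by
    rw [List.filter_eq_nil_iff]
    intro p hp
    have h1 := hub p hp
    have h2 : p ≠ i := fun h => hni (h ▸ hp)
    simp only [decide_eq_true_eq]
    omega
  have hf0 : F.filter (fun p => decide ((0:Int) ≤ p)) = F := by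
    rw [List.filter_eq_self]
    intro p hp
    simpa using h0 p hp
  unfold pvScanDist
  rw [hfi, hf0]
  cases F with
  | nil => exact absurd rfl hne
  | cons q tl =>
    have hq0 : (0:Int) ≤ q := h0 q List.mem_cons_self
    have hqn : q < n := hub q List.mem_cons_self
    simp only [List.head?_nil, List.head?_cons]
    omega

lemma pvScanDist_le (n : Int) (F : List Int) (i : Int) (hi : 0 ≤ i)
    (h0 : ∀ p ∈ F, 0 ≤ p) (hub : ∀ p ∈ F, p < n) :
    pvScanDist n F i ≤ n.toNat := by
  unfold pvScanDist
  cases hh : (F.filter (fun p => decide (i ≤ p))).head? with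
  | some p =>
    have hpm : p ∈ F.filter (fun p => decide (i ≤ p)) := List.mem_of_mem_head? (by rw [hh]; rfl)
    rw [List.mem_filter, decide_eq_true_eq] at hpm
    have h1 := hub p hpm.1
    simp only []
    omega
  | none =>
    cases hq : F.head? with
    | none => simp
    | some q =>
      have hqm : q ∈ F := List.mem_of_mem_head? (by rw [hq]; rfl)
      have h1 := hub q hqm
      have h2 := h0 q hqm
      have h3 : q < i := by
        by_contra h
        have : q ∈ F.filter (fun p => decide (i ≤ p)) := by
          rw [List.mem_filter, decide_eq_true_eq]
          exact ⟨hqm, by omega⟩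
        rw [List.head?_eq_none_iff.mp hh] at this
        simp at this
      simp only []
      omega

-- A's loop, one step: the placing branch …
lemma pvALoop_place (k : Int) (f : Nat) (sched : List (Option Int)) (i : Int) (x : Int)
    (rest : List Int) (h1 : PySem.List.pyGet? sched i = some none) :
    pvALoop k (f + 1) sched i (x :: rest) =
      pvALoop k f (PySem.List.pySetD sched i (some x))
        (if ((PySem.List.pySetD sched i (some x)).length : Int) ≤ i + k then 0 else i + k) rest := by
  simp [pvALoop, h1]

-- … and the skipping branch
lemma pvALoop_skip (k : Int) (f : Nat) (sched : List (Option Int)) (i : Int) (x : Int)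
    (rest : List Int) (v : Int) (h1 : PySem.List.pyGet? sched i = some (some v)) :
    pvALoop k (f + 1) sched i (x :: rest) =
      pvALoop k f sched (if (sched.length : Int) ≤ i + 1 then 0 else i + 1) (x :: rest) := by
  simp [pvALoop, h1]

-- B's first step only looks at i through the popped index
lemma pvBLoop_congr (n k : Int) (x : Int) (rest : List Int) (sched : List (Option Int))
    (free : List Int) (i i' : Int)
    (h : (if pvBisect free i 0 free.length = free.length then 0 else pvBisect free i 0 free.length)
       = (if pvBisect free i' 0 free.length = free.length then 0 else pvBisect free i' 0 free.length)) :
    pvBLoop n k (x :: rest) sched free i = pvBLoop n k (x :: rest) sched free i' := by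
  simp only [pvBLoop]
  rw [h]

-- the main loop equivalence
lemma pvMain (n k : Int) (hn : 0 < n) (hk : 0 ≤ k) :
    ∀ (fuel : Nat) (nodes : List Int) (sched : List (Option Int)) (i : Int),
      sched.length = n.toNat → 0 ≤ i → i < n →
      nodes.length ≤ (pvFreeOf sched).length →
      nodes.length * (n.toNat + 1) + pvScanDist n (pvFreeOf sched) i ≤ fuel →
      pvALoop k fuel sched i nodes = pvBLoop n k nodes sched (pvFreeOf sched) i := by
  intro fuel
  induction fuel with
  | zero =>
    intro nodes sched i hlen hi0 hin hcnt hfuel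
    cases nodes with
    | nil => simp [pvALoop, pvBLoop]
    | cons x rest =>
      exfalso
      have h1 : (x :: rest).length * (n.toNat + 1) = 0 := by omega
      rcases Nat.mul_eq_zero.mp h1 with h | h <;> simp at h
  | succ f ih =>
    intro nodes sched i hlen hi0 hin hcnt hfuel
    cases nodes with
    | nil => simp [pvALoop, pvBLoop]
    | cons x rest =>
      simp only [List.length_cons] at hcnt hfuel
      have hiN : i.toNat < sched.length := by omega
      have hcast : ((sched.length : Nat) : Int) = n := by rw [hlen]; omega
      have hgl : PySem.List.pyGet? sched i = some sched[i.toNat] :=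
        PySem.List.pyGet?_eq_some_getElem sched hi0 (by rw [hlen]; omega)
      have hFs := pvFreeOf_sorted sched
      have hF0 : ∀ p ∈ pvFreeOf sched, 0 ≤ p := fun p hp => (pvFreeOf_bounds sched p hp).1
      have hFub : ∀ p ∈ pvFreeOf sched, p < n := by
        intro p hp
        have h2 := (pvFreeOf_bounds sched p hp).2
        rw [hlen] at h2
        omega
      have hFne : pvFreeOf sched ≠ [] := by
        intro h
        rw [h] at hcnt
        simp at hcnt
      by_cases hcell : sched[i.toNat] = none
      · -- A places node x at slot i; B pops slot i from the free list
        have hmem : i ∈ pvFreeOf sched := by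
          have h1 : ((i.toNat : Nat) : Int) ∈ pvFreeOf sched :=
            (pvMem_freeOf sched i.toNat).mpr (by rw [List.getElem?_eq_getElem hiN, hcell])
          simpa [Int.toNat_of_nonneg hi0] using h1
        obtain ⟨hlt, hval⟩ := pvBisect_of_mem _ i hFs hmem
        have hset : PySem.List.pySetD sched i (some x) = sched.set i.toNat (some x) :=
          PySem.List.pySetD_of_nonneg sched (some x) hi0
        have hlen' : (sched.set i.toNat (some x)).length = n.toNat := by
          rw [List.length_set, hlen]
        have hfree' : (pvFreeOf sched).eraseIdx (pvBisect (pvFreeOf sched) i 0 (pvFreeOf sched).length)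
            = pvFreeOf (sched.set i.toNat (some x)) := by
          rw [pvEraseIdx_eq_filter _ _ hlt (pvFreeOf_nodup sched), hval,
            pvFreeOf_set sched i.toNat hiN x, Int.toNat_of_nonneg hi0]
        have hpop : PySem.List.pop? (pvFreeOf sched)
            (((if pvBisect (pvFreeOf sched) i 0 (pvFreeOf sched).length = (pvFreeOf sched).length
                then 0 else pvBisect (pvFreeOf sched) i 0 (pvFreeOf sched).length) : Nat) : Int)
            = some (i, pvFreeOf (sched.set i.toNat (some x))) := by
          rw [if_neg (by omega), PySem.List.pop?_natCast _ _ hlt, ← hfree']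
          have : (pvFreeOf sched)[pvBisect (pvFreeOf sched) i 0 (pvFreeOf sched).length] = i := by
            rw [← List.getD_eq_getElem _ 0 hlt]
            exact hval
          rw [this]
        rw [pvALoop_place k f sched i x rest (by rw [hgl, hcell])]
        conv_rhs => rw [pvBLoop]
        rw [hpop]
        have hred : (match some (i, pvFreeOf (sched.set i.toNat (some x))) with
            | none => sched
            | some (pos, free') => pvBLoop n k rest (PySem.List.pySetD sched pos (some x)) free'
                (if n ≤ pos + k then 0 else pos + k))
            = pvBLoop n k rest (PySem.List.pySetD sched i (some x))
                (pvFreeOf (sched.set i.toNat (some x))) (if n ≤ i + k then 0 else i + k) := rfl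
        rw [hred, hset, hlen']
        have hicast : ((n.toNat : Nat) : Int) = n := by omega
        rw [hicast]
        set i2 := if n ≤ i + k then 0 else i + k with hi2
        have hi20 : 0 ≤ i2 := by
          rw [hi2]; split <;> omega
        have hi2n : i2 < n := by
          rw [hi2]; split <;> omega
        have hlenF : (pvFreeOf (sched.set i.toNat (some x))).length = (pvFreeOf sched).length - 1 := by
          rw [← hfree', List.length_eraseIdx, if_pos hlt]
        have hFs' := pvFreeOf_sorted (sched.set i.toNat (some x))
        have hF0' : ∀ p ∈ pvFreeOf (sched.set i.toNat (some x)), 0 ≤ p :=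
          fun p hp => (pvFreeOf_bounds _ p hp).1
        have hFub' : ∀ p ∈ pvFreeOf (sched.set i.toNat (some x)), p < n := by
          intro p hp
          have h2 := (pvFreeOf_bounds _ p hp).2
          rw [hlen'] at h2
          omega
        have hsd := pvScanDist_le n (pvFreeOf (sched.set i.toNat (some x))) i2 hi20 hF0' hFub'
        have hexp : (rest.length + 1) * (n.toNat + 1)
            = rest.length * (n.toNat + 1) + n.toNat + 1 := by ring
        apply ih rest (sched.set i.toNat (some x)) i2 hlen' hi20 hi2n (by omega) (by omega)
      · -- A skips the filled slot; B's binary search is unchanged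
        obtain ⟨v, hv⟩ : ∃ v, sched[i.toNat] = some v := by
          cases hx : sched[i.toNat] with
          | none => exact absurd hx hcell
          | some v => exact ⟨v, rfl⟩
        have hnm : i ∉ pvFreeOf sched := by
          intro h
          have h1 : ((i.toNat : Nat) : Int) ∈ pvFreeOf sched := by
            rwa [Int.toNat_of_nonneg hi0]
          have h2 := (pvMem_freeOf sched i.toNat).mp h1
          rw [List.getElem?_eq_getElem hiN, hv] at h2
          simp at h2
        rw [pvALoop_skip k f sched i x rest v (by rw [hgl, hv]), hcast]
        by_cases hwrap : n ≤ i + 1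
        · rw [if_pos hwrap]
          have hb1 : pvBisect (pvFreeOf sched) i 0 (pvFreeOf sched).length = (pvFreeOf sched).length := by
            apply pvBisect_top _ _ hFs
            intro p hp
            have h1 := hFub p hp
            have h2 : p ≠ i := fun h => hnm (h ▸ hp)
            omega
          have hb2 : pvBisect (pvFreeOf sched) 0 0 (pvFreeOf sched).length = 0 :=
            pvBisect_zero _ hFs hF0
          have hFlen : 0 < (pvFreeOf sched).length := by
            cases hFe : pvFreeOf sched with
            | nil => exact absurd hFe hFne
            | cons a l => simp
          rw [ih (x :: rest) sched 0 hlen (by omega) hn hcnt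
            (by simp only [List.length_cons]; have := pvScanDist_wrap n (pvFreeOf sched) i hFne hnm hF0 hFub hwrap hin; omega)]
          apply pvBLoop_congr
          rw [hb1, hb2, if_pos rfl, if_neg (by omega)]
        · rw [if_neg hwrap]
          have hb := pvBisect_succ (pvFreeOf sched) i hFs hnm
          rw [ih (x :: rest) sched (i + 1) hlen (by omega) (by omega) hcnt
            (by simp only [List.length_cons]; have := pvScanDist_succ n (pvFreeOf sched) i hFne hnm hF0 (by omega); omega)]
          apply pvBLoop_congr
          rw [hb]

lemma pvALoop_nil_sched (k : Int) (fuel : Nat) (i : Int) (ns : List Int) :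
    pvALoop k fuel ([] : List (Option Int)) i ns = [] := by
  cases fuel with
  | zero => rfl
  | succ f =>
    cases ns with
    | nil => rfl
    | cons x rest =>
      have h : PySem.List.pyGet? ([] : List (Option Int)) i = none := by
        rw [PySem.List.pyGet?_eq_none_iff]
        simp [PySem.Raise.InRange]
      simp [pvALoop, h]

lemma pvFreeOf_replicate (m : Nat) :
    pvFreeOf (List.replicate m (none : Option Int))
      = (List.range m).map (fun (t : Nat) => (t : Int)) := by
  unfold pvFreeOf
  rw [List.length_replicate]
  congr 1
  rw [List.filter_eq_self]
  intro t ht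
  rw [List.mem_range] at ht
  simp [ht]

lemma pvRange_eq (n : Int) :
    PySem.List.pyRange 0 n 1 = (List.range n.toNat).map (fun (t : Nat) => (t : Int)) := by
  rw [PySem.List.pyRange_one]
  simp

lemma pvScanDist_zero (n : Int) (m : Nat) (hm : 0 < m) :
    pvScanDist n ((List.range m).map (fun (t : Nat) => (t : Int))) 0 = 0 := by
  unfold pvScanDist
  have hfilter : ((List.range m).map (fun (t : Nat) => (t : Int))).filter
      (fun p => decide ((0:Int) ≤ p)) = (List.range m).map (fun (t : Nat) => (t : Int)) := by
    rw [List.filter_eq_self]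
    intro p hp
    simp only [List.mem_map, List.mem_range] at hp
    obtain ⟨t, _, rfl⟩ := hp
    simp
  rw [hfilter]
  cases m with
  | zero => omega
  | succ m' =>
    rw [List.range_succ_eq_map]
    simp

-- ===== VERDICT (by name: the statement is the Claim_ definition above) =====
theorem defaultFDMASchedule_spec : Claim_equal_defaultFDMASchedule := by
  unfold Claim_equal_defaultFDMASchedule
  intro n k nodes _hdom hpre
  unfold Spec_defaultFDMASchedule defaultFDMASchedule defaultFDMASchedule_alt
  by_cases hn : n ≤ 0
  · rw [if_pos hn]
    have hm : n.toNat = 0 := by omega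
    rw [hm, List.replicate_zero]
    exact pvALoop_nil_sched k _ _ _
  · rw [if_neg hn]
    have hn' : 0 < n := by omega
    rcases hpre.1 hn' with hk | hnil
    · rw [pvRange_eq n, ← pvFreeOf_replicate n.toNat]
      apply pvMain n k hn' hk
      · rw [List.length_replicate]
      · exact le_refl 0
      · exact hn'
      · rw [pvFreeOf_replicate n.toNat, List.length_map, List.length_range,
          PySem.List.slice_to _ (le_of_lt hn')]
        simp [List.length_take]
      · rw [pvFreeOf_replicate n.toNat, pvScanDist_zero n n.toNat (by omega),
          List.length_replicate]
        omega
    · subst hnil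
      have hsl : PySem.List.slice ([] : List Int) none (some n) = [] := by
        rw [PySem.List.slice_to _ (le_of_lt hn')]
        simp
      rw [hsl]
      simp [pvALoop, pvBLoop]
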